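-- pv_equiv track=rewrite | github.com/ToanChau/Game-y-th-ng | Trò chơi Đẩy thùng.py | map_to_game_state
-- ===== SOURCE A (Python) =====
-- from typing import List, Tuple, Optional
--
-- def map_to_game_state(map_data: List[str]) -> Tuple[List[List[int]], Tuple[int, int], List[Tuple[int, int]], List[Tuple[int, int]]]:
--     maze = []
--     player_pos = None
--     boxes = []
--     targets = []
--
--     for y, row in enumerate(map_data):
--         maze_row = []
--         for x, cell in enumerate(row):
--             if cell == 'W':
--                 maze_row.append(1)
--             elif cell == 'P':
--                 maze_row.append(0)
--                 player_pos = (x, y)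
--             elif cell == 'B':
--                 maze_row.append(0)
--                 boxes.append((x, y))
--             elif cell == 'T':
--                 maze_row.append(0)
--                 targets.append((x, y))
--             else:
--                 maze_row.append(0)
--         maze.append(maze_row)
--     return maze, player_pos, boxes, targets
-- ===== SOURCE B (Python) =====
-- from typing import List, Tuple, Optional
--
-- def map_to_game_state(map_data: List[str]) -> Tuple[List[List[int]], Tuple[int, int], List[Tuple[int, int]], List[Tuple[int, int]]]:
--     maze = [[1 if c == 'W' else 0 for c in row] for row in map_data]
--     player_pos = None
--     for y in range(len(map_data) - 1, -1, -1):
--         x = map_data[y].rfind('P')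
--         if x != -1:
--             player_pos = (x, y)
--             break
--     boxes = [(x, y) for y, row in enumerate(map_data) for x, c in enumerate(row) if c == 'B']
--     targets = [(x, y) for y, row in enumerate(map_data) for x, c in enumerate(row) if c == 'T']
--     return maze, player_pos, boxes, targets
-- ===== Notes on version B (the rewrite author's own statement) =====
-- stated objective: alternative
-- what changed: Replaces A's single fused per-cell loop with four independent passes: a nested comprehension for the maze grid, a reverse scan with str.rfind that stops at the last 'P' (preserving last-P-wins), and two comprehensions collecting box and target coordinates.
import Mathlib
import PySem

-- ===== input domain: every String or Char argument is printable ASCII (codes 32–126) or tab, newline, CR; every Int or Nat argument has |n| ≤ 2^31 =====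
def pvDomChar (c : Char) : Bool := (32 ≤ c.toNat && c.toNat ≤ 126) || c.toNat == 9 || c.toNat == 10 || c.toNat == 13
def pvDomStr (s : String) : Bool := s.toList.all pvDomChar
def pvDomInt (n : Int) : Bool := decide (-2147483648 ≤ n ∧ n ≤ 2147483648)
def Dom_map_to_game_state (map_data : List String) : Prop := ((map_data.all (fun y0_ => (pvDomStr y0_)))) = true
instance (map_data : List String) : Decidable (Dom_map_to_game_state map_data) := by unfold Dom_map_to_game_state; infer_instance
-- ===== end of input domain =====

-- B replaces A's single fused per-cell loop by four independent passes (maze comprehension,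
-- reverse rfind scan for the player, two collection passes for boxes/targets); objective: alternative.


-- ===== PORT A =====
-- inner loop of A: one pass over the row's cells, threading (maze_row, player_pos, boxes, targets)
def pvACell : List Char → Int → Int → List Int → Option (Int × Int) → List (Int × Int) → List (Int × Int) →
    List Int × Option (Int × Int) × List (Int × Int) × List (Int × Int)
  | [], _, _, mr, p, b, t => (mr, p, b, t)
  | c :: cs, x, y, mr, p, b, t =>
    if c = 'W' then pvACell cs (x + 1) y (mr ++ [1]) p b t
    else if c = 'P' then pvACell cs (x + 1) y (mr ++ [0]) (some (x, y)) b t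
    else if c = 'B' then pvACell cs (x + 1) y (mr ++ [0]) p (b ++ [(x, y)]) t
    else if c = 'T' then pvACell cs (x + 1) y (mr ++ [0]) p b (t ++ [(x, y)])
    else pvACell cs (x + 1) y (mr ++ [0]) p b t

-- outer loop of A over the rows
def pvARow : List String → Int → List (List Int) → Option (Int × Int) → List (Int × Int) → List (Int × Int) →
    List (List Int) × Option (Int × Int) × List (Int × Int) × List (Int × Int)
  | [], _, mz, p, b, t => (mz, p, b, t)
  | r :: rs, y, mz, p, b, t =>
    match pvACell r.toList 0 y [] p b t with
    | (mr, p', b', t') => pvARow rs (y + 1) (mz ++ [mr]) p' b' t'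

def map_to_game_state (map_data : List String) : List (List Int) × (Option (Int × Int)) × (List (Int × Int)) × (List (Int × Int)) :=
  pvARow map_data 0 [] none [] []

-- ===== PORT B =====
-- row.rfind('P'): rightmost index of 'P', none if absent
def pvRfindP : List Char → Option Nat
  | [] => none
  | c :: cs =>
    match pvRfindP cs with
    | some i => some (i + 1)
    | none => if c = 'P' then some 0 else none

-- the reverse loop 'for y in range(len-1, -1, -1): …': recursion that consults later rows first
def pvFindPlayer : List String → Int → Option (Int × Int)
  | [], _ => none
  | r :: rs, y =>
    match pvFindPlayer rs (y + 1) with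
    | some p => some p
    | none =>
      match pvRfindP r.toList with
      | some x => some ((x : Int), y)
      | none => none

-- one comprehension pass collecting the coordinates of a given cell character
def pvCells (ch : Char) : List Char → Int → Int → List (Int × Int)
  | [], _, _ => []
  | c :: cs, x, y => (if c = ch then [(x, y)] else []) ++ pvCells ch cs (x + 1) y

def pvCollect (ch : Char) : List String → Int → List (Int × Int)
  | [], _ => []
  | r :: rs, y => pvCells ch r.toList 0 y ++ pvCollect ch rs (y + 1)

def map_to_game_state_alt (map_data : List String) : List (List Int) × (Option (Int × Int)) × (List (Int × Int)) × (List (Int × Int)) :=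
  (map_data.map (fun r => r.toList.map (fun c => if c = 'W' then (1 : Int) else 0)),
   pvFindPlayer map_data 0,
   pvCollect 'B' map_data 0,
   pvCollect 'T' map_data 0)

-- ===== PRECONDITION & SPEC =====
def Spec_map_to_game_state (map_data : List String) (out : List (List Int) × (Option (Int × Int)) × (List (Int × Int)) × (List (Int × Int))) : Prop := out = map_to_game_state_alt map_data
instance (map_data : List String) (out : List (List Int) × (Option (Int × Int)) × (List (Int × Int)) × (List (Int × Int))) : Decidable (Spec_map_to_game_state map_data out) := by unfold Spec_map_to_game_state; infer_instance

-- ===== CLAIM (what is proved, stated in full; the proofs are below) =====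
def Claim_equal_map_to_game_state : Prop := ∀ (map_data : List String), Dom_map_to_game_state map_data → Spec_map_to_game_state map_data (map_to_game_state map_data)

-- ===== LEMMAS AND PROOFS =====
-- the player contribution of one row, as B computes it
def pvRowPlayer (cs : List Char) (x y : Int) : Option (Int × Int) :=
  (pvRfindP cs).map (fun i => (x + (i : Int), y))

theorem pvACell_eq (cs : List Char) : ∀ (x y : Int) mr p b t,
    pvACell cs x y mr p b t =
      (mr ++ cs.map (fun c => if c = 'W' then (1 : Int) else 0),
       (pvRowPlayer cs x y).or p,
       b ++ pvCells 'B' cs x y,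
       t ++ pvCells 'T' cs x y) := by
  induction cs with
  | nil => intro x y mr p b t; simp [pvACell, pvRowPlayer, pvRfindP, pvCells]
  | cons c cs ih =>
    intro x y mr p b t
    by_cases hW : c = 'W' <;> by_cases hP : c = 'P' <;> by_cases hB : c = 'B' <;> by_cases hT : c = 'T' <;>
      simp_all [pvACell, pvRowPlayer, pvRfindP, pvCells] <;>
      rcases h : pvRfindP cs with _ | i <;>
      simp [h, Option.or] <;> push_cast <;> ring_nf

theorem pvARow_eq (rs : List String) : ∀ (y : Int) mz p b t,
    pvARow rs y mz p b t =
      (mz ++ rs.map (fun r => r.toList.map (fun c => if c = 'W' then (1 : Int) else 0)),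
       (pvFindPlayer rs y).or p,
       b ++ pvCollect 'B' rs y,
       t ++ pvCollect 'T' rs y) := by
  induction rs with
  | nil => intro y mz p b t; simp [pvARow, pvFindPlayer, pvCollect]
  | cons r rs ih =>
    intro y mz p b t
    rcases h : pvFindPlayer rs (y + 1) with _ | q <;>
      rcases h2 : pvRfindP r.toList with _ | i <;>
        simp [pvARow, pvACell_eq, ih, pvFindPlayer, pvCollect, h, h2, pvRowPlayer, Option.or,
          List.append_assoc]

-- ===== VERDICT (by name: the statement is the Claim_ definition above) =====
theorem map_to_game_state_spec : Claim_equal_map_to_game_state := by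
  intro md _
  show map_to_game_state md = map_to_game_state_alt md
  simp [map_to_game_state, map_to_game_state_alt, pvARow_eq]
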